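-- pv_equiv track=rewrite | github.com/arashsheydaei/CodeDoc-AI | codedoc/js_parser.py | _parse_jsdoc
-- ===== SOURCE A (Python) =====
-- from typing import List, Optional, Dict, Any
--
-- def _parse_jsdoc(jsdoc_content: str) -> tuple[Optional[str], Dict[str, Any]]:
--     """Parse JSDoc content to extract description and tags."""
--     lines = jsdoc_content.split('\n')
--     description_lines = []
--     tags = {}
--
--     current_tag = None
--     current_tag_content = []
--
--     for line in lines:
--         line = line.strip()
--         if line.startswith('/**') or line.startswith('*/'):
--             continue
--         if line.startswith('*'):
--             line = line[1:].strip()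
--
--         if line.startswith('@'):
--             # Save previous tag
--             if current_tag:
--                 tags[current_tag] = ' '.join(current_tag_content)
--
--             # Parse new tag
--             parts = line[1:].split(None, 1)
--             current_tag = parts[0]
--             current_tag_content = [parts[1]] if len(parts) > 1 else []
--         elif current_tag:
--             current_tag_content.append(line)
--         else:
--             description_lines.append(line)
--
--     # Save last tag
--     if current_tag:
--         tags[current_tag] = ' '.join(current_tag_content)
--
--     description = ' '.join(description_lines).strip() if description_lines else None
--     return description, tags
-- ===== SOURCE B (Python) =====
-- def _parse_jsdoc(jsdoc_content: str):
--     """Two-phase: clean all lines first, then segment from the right into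
--     (description-pending, tag groups) and build the tag dict per group."""
--     cleaned = []
--     for raw in jsdoc_content.split('\n'):
--         s = raw.strip()
--         if s.startswith('/**') or s.startswith('*/'):
--             continue
--         cleaned.append(s[1:].strip() if s.startswith('*') else s)
--
--     pending, groups = [], []
--     for s in reversed(cleaned):
--         if s.startswith('@'):
--             groups.insert(0, [s] + pending)
--             pending = []
--         else:
--             pending.insert(0, s)
--
--     description = ' '.join(pending).strip() if pending else None
--
--     tags = {}
--     for g in groups:
--         parts = g[0][1:].split(None, 1)
--         tags[parts[0]] = ' '.join(parts[1:] + g[1:])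
--     return description, tags
-- ===== Notes on version B (the rewrite author's own statement) =====
-- stated objective: alternative
-- what changed: A's single left-to-right loop with mutable current-tag state is replaced by a two-phase decomposition: clean all lines first, then segment them from the right (a reversed fold) into description-pending lines and '@'-led tag groups, and build the tag dict with one pass over the groups.
import Mathlib
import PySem

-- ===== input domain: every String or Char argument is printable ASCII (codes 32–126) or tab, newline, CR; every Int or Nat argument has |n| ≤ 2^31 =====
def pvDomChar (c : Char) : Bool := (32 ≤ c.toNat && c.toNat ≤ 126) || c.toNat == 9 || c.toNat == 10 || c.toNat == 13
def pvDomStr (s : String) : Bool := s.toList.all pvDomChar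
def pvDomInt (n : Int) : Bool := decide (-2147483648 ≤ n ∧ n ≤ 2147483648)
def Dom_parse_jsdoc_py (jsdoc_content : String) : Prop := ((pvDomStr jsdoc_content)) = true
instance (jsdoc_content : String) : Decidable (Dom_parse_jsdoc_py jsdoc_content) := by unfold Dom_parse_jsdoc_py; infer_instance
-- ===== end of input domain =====

-- B replaces A's running current-tag state machine by a right-fold segmentation of the
-- cleaned lines into (description-pending, tag groups); objective: alternative decomposition.

-- ===== PORT A =====
-- A-side helper: "save previous tag" (Python duplicates this code in the loop and after it)
def pvFlush (tags : PySem.Dict String String) (ct : Option String) (ctc : List String) :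
    PySem.Dict String String :=
  match ct with
  | some t => tags.insert t (PySem.Str.join " " ctc)
  | none => tags

-- A-side helper: A's loop body after the line has been cleaned (the '@'-dispatch)
def pvStepA (st : List String × PySem.Dict String String × Option String × List String)
    (line : String) : List String × PySem.Dict String String × Option String × List String :=
  if PySem.Str.startswith line "@" then
    let tags := pvFlush st.2.1 st.2.2.1 st.2.2.2
    let parts := PySem.Str.split₀Max (PySem.Str.slice line (some 1) none) 1
    -- parts[0] raises IndexError in Python when parts = [] (the line is exactly "@");
    -- Pre_parse_jsdoc_py excludes those inputs, headD "" is a stand-in outside it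
    (st.1, tags, some (parts.headD ""), parts.drop 1)
  else
    match st.2.2.1 with
    | some _ => (st.1, st.2.1, st.2.2.1, st.2.2.2 ++ [line])
    | none => (st.1 ++ [line], st.2.1, st.2.2.1, st.2.2.2)

-- A-side helper: A's whole loop body (strip, skip '/**'/'*/', strip a leading '*', dispatch)
def pvBodyA (st : List String × PySem.Dict String String × Option String × List String)
    (raw : String) : List String × PySem.Dict String String × Option String × List String :=
  let line := PySem.Str.strip raw
  if PySem.Str.startswith line "/**" || PySem.Str.startswith line "*/" then st
  else
    pvStepA st (if PySem.Str.startswith line "*" then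
      PySem.Str.strip (PySem.Str.slice line (some 1) none) else line)

def parse_jsdoc_py (jsdoc_content : String) : Option String × (List (String × String)) :=
  let lines := (PySem.Str.split? jsdoc_content "\n").getD []   -- sep "\n" ≠ "": never none
  let st := lines.foldl pvBodyA ([], PySem.Dict.empty, none, [])
  let tags := pvFlush st.2.1 st.2.2.1 st.2.2.2
  ((if st.1.isEmpty then none else some (PySem.Str.strip (PySem.Str.join " " st.1))), tags.items)

-- ===== PORT B =====
-- B-side helper: one step of the reversed segmentation loop
def pvSeg (s : String) (pg : List String × List (List String)) :
    List String × List (List String) :=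
  if PySem.Str.startswith s "@" then ([], (s :: pg.1) :: pg.2) else (s :: pg.1, pg.2)

-- B-side helper: record one tag group (groups always start with their '@'-line,
-- so the [] branch is unreachable; Python raises there, outside Pre_)
def pvTagOf (tags : PySem.Dict String String) (g : List String) : PySem.Dict String String :=
  match g with
  | [] => tags
  | g0 :: gr =>
    let parts := PySem.Str.split₀Max (PySem.Str.slice g0 (some 1) none) 1
    tags.insert (parts.headD "") (PySem.Str.join " " (parts.drop 1 ++ gr))

-- B-side helper: one step of the cleaning loop (same per-line cleaning as A's source)
def pvBodyB (acc : List String) (raw : String) : List String :=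
  let s := PySem.Str.strip raw
  if PySem.Str.startswith s "/**" || PySem.Str.startswith s "*/" then acc
  else acc ++ [if PySem.Str.startswith s "*" then
      PySem.Str.strip (PySem.Str.slice s (some 1) none) else s]

def parse_jsdoc_py_alt (jsdoc_content : String) : Option String × (List (String × String)) :=
  let lines := (PySem.Str.split? jsdoc_content "\n").getD []
  let cleaned := lines.foldl pvBodyB []
  let pg := cleaned.foldr pvSeg ([], [])   -- reversed(cleaned) loop with insert(0, ·)
  ((if pg.1.isEmpty then none else some (PySem.Str.strip (PySem.Str.join " " pg.1))),
   (pg.2.foldl pvTagOf PySem.Dict.empty).items)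

-- ===== PRECONDITION & SPEC =====
-- Pre_ excludes exactly the inputs where some line cleans to the bare string "@":
-- there Python A (and B alike) raises IndexError on parts[0].
def Pre_parse_jsdoc_py (jsdoc_content : String) : Prop :=
  ∀ s ∈ (PySem.Str.split? jsdoc_content "\n").getD [],
    ¬ (PySem.Str.startswith (PySem.Str.strip s) "/**" = false ∧
       PySem.Str.startswith (PySem.Str.strip s) "*/" = false ∧
       (if PySem.Str.startswith (PySem.Str.strip s) "*" = true then
          PySem.Str.strip (PySem.Str.slice (PySem.Str.strip s) (some 1) none)
        else PySem.Str.strip s) = "@")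
instance (jsdoc_content : String) : Decidable (Pre_parse_jsdoc_py jsdoc_content) := by
  unfold Pre_parse_jsdoc_py; infer_instance

def pvWitness_parse_jsdoc_py : String := "/**\n * Adds two numbers.\n * @param x left\n */"

def Spec_parse_jsdoc_py (jsdoc_content : String) (out : Option String × (List (String × String))) : Prop := out = parse_jsdoc_py_alt jsdoc_content
instance (jsdoc_content : String) (out : Option String × (List (String × String))) : Decidable (Spec_parse_jsdoc_py jsdoc_content out) := by unfold Spec_parse_jsdoc_py; infer_instance

-- ===== CLAIM (what is proved, stated in full; the proofs are below) =====
def Claim_equal_parse_jsdoc_py : Prop := ∀ (jsdoc_content : String), Dom_parse_jsdoc_py jsdoc_content → Pre_parse_jsdoc_py jsdoc_content → Spec_parse_jsdoc_py jsdoc_content (parse_jsdoc_py jsdoc_content)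

-- ===== LEMMAS AND PROOFS =====

-- the per-line cleaning both Pythons perform (none = line dropped)
def pvClean1 (raw : String) : Option String :=
  let s := PySem.Str.strip raw
  if PySem.Str.startswith s "/**" || PySem.Str.startswith s "*/" then none
  else some (if PySem.Str.startswith s "*" then
      PySem.Str.strip (PySem.Str.slice s (some 1) none) else s)

theorem pvFoldA (ls : List String)
    (st : List String × PySem.Dict String String × Option String × List String) :
    ls.foldl pvBodyA st = (ls.filterMap pvClean1).foldl pvStepA st := by
  induction ls generalizing st with
  | nil => rfl
  | cons a l ih =>
    rw [List.foldl_cons]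
    by_cases h : (PySem.Str.startswith (PySem.Str.strip a) "/**"
        || PySem.Str.startswith (PySem.Str.strip a) "*/") = true
    · rw [List.filterMap_cons_none (by simp only [pvClean1]; rw [if_pos h]),
        (by simp only [pvBodyA]; rw [if_pos h] : pvBodyA st a = st)]
      exact ih st
    · rw [List.filterMap_cons_some (by simp only [pvClean1]; rw [if_neg h]),
        (by simp only [pvBodyA]; rw [if_neg h] :
          pvBodyA st a = pvStepA st (if PySem.Str.startswith (PySem.Str.strip a) "*" then
            PySem.Str.strip (PySem.Str.slice (PySem.Str.strip a) (some 1) none)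
          else PySem.Str.strip a)),
        List.foldl_cons]
      exact ih _

theorem pvFoldB (ls : List String) (acc : List String) :
    ls.foldl pvBodyB acc = acc ++ ls.filterMap pvClean1 := by
  induction ls generalizing acc with
  | nil => simp
  | cons a l ih =>
    rw [List.foldl_cons]
    by_cases h : (PySem.Str.startswith (PySem.Str.strip a) "/**"
        || PySem.Str.startswith (PySem.Str.strip a) "*/") = true
    · rw [List.filterMap_cons_none (by simp only [pvClean1]; rw [if_pos h]),
        (by simp only [pvBodyB]; rw [if_pos h] : pvBodyB acc a = acc)]
      exact ih acc
    · rw [List.filterMap_cons_some (by simp only [pvClean1]; rw [if_neg h]),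
        (by simp only [pvBodyB]; rw [if_neg h] :
          pvBodyB acc a = acc ++ [if PySem.Str.startswith (PySem.Str.strip a) "*" then
            PySem.Str.strip (PySem.Str.slice (PySem.Str.strip a) (some 1) none)
          else PySem.Str.strip a]),
        ih]
      simp

theorem pvFlush_some (tags : PySem.Dict String String) (t : String) (ctc : List String) :
    pvFlush tags (some t) ctc = tags.insert t (PySem.Str.join " " ctc) := rfl

theorem pvFlush_none (tags : PySem.Dict String String) (ctc : List String) :
    pvFlush tags none ctc = tags := rfl

-- A's loop run from a "current tag open" state: description lines stay d0, and the
-- final flushed dict is B's group fold seeded with the open tag closed over the pending lines.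
theorem pvMainSome (cs : List String) (d0 : List String) (t0 : PySem.Dict String String)
    (t : String) (c : List String) :
    (cs.foldl pvStepA (d0, t0, some t, c)).1 = d0 ∧
    pvFlush (cs.foldl pvStepA (d0, t0, some t, c)).2.1
        (cs.foldl pvStepA (d0, t0, some t, c)).2.2.1
        (cs.foldl pvStepA (d0, t0, some t, c)).2.2.2
      = (cs.foldr pvSeg ([], [])).2.foldl pvTagOf
          (t0.insert t (PySem.Str.join " " (c ++ (cs.foldr pvSeg ([], [])).1))) := by
  induction cs generalizing t0 t c with
  | nil => simp [pvFlush]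
  | cons s l ih =>
    simp only [List.foldl_cons, List.foldr_cons]
    cases hs : PySem.Str.startswith s "@" with
    | true =>
      simp only [pvStepA, hs, if_true, pvSeg, pvFlush_some, List.append_nil]
      refine ⟨(ih _ _ _).1, ?_⟩
      rw [(ih _ _ _).2]
      simp [pvTagOf]
    | false =>
      simp only [pvStepA, hs, Bool.false_eq_true, if_false, pvSeg]
      refine ⟨(ih _ _ _).1, ?_⟩
      rw [(ih _ _ _).2]
      simp

-- A's loop run from the "no tag yet" state: leading cleaned lines become description,
-- the groups produce exactly B's tag dict.
theorem pvMainNone (cs : List String) (d0 : List String) (t0 : PySem.Dict String String)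
    (c0 : List String) :
    (cs.foldl pvStepA (d0, t0, none, c0)).1 = d0 ++ (cs.foldr pvSeg ([], [])).1 ∧
    pvFlush (cs.foldl pvStepA (d0, t0, none, c0)).2.1
        (cs.foldl pvStepA (d0, t0, none, c0)).2.2.1
        (cs.foldl pvStepA (d0, t0, none, c0)).2.2.2
      = (cs.foldr pvSeg ([], [])).2.foldl pvTagOf t0 := by
  induction cs generalizing d0 c0 with
  | nil => simp [pvFlush]
  | cons s l ih =>
    simp only [List.foldl_cons, List.foldr_cons]
    cases hs : PySem.Str.startswith s "@" with
    | true =>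
      simp only [pvStepA, hs, if_true, pvSeg, pvFlush_none, List.append_nil]
      refine ⟨(pvMainSome l _ _ _ _).1, ?_⟩
      rw [(pvMainSome l _ _ _ _).2]
      simp [pvTagOf]
    | false =>
      simp only [pvStepA, hs, Bool.false_eq_true, if_false, pvSeg]
      refine ⟨by rw [(ih _ _).1]; simp, ?_⟩
      rw [(ih _ _).2]

-- ===== VERDICT (by name: the statement is the Claim_ definition above) =====
theorem parse_jsdoc_py_spec : Claim_equal_parse_jsdoc_py := by
  intro c _ _
  unfold Spec_parse_jsdoc_py parse_jsdoc_py parse_jsdoc_py_alt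
  simp only [pvFoldA, pvFoldB, List.nil_append]
  obtain ⟨h1, h2⟩ := pvMainNone
    (((PySem.Str.split? c "\n").getD []).filterMap pvClean1) [] PySem.Dict.empty []
  rw [h1, h2]
  simp
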